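-- pv_equiv track=rewrite | github.com/rajramana/BigDataCompressor1 | compression_algorithms.py | delta_of_delta_decode
-- ===== SOURCE A (Python) =====
-- def delta_of_delta_decode(first_value, first_delta, second_deltas):
--     """
--     Decodes a delta-of-delta-encoded sequence
--
--     Parameters:
--     -----------
--     first_value : number
--         The first value of the original sequence
--     first_delta : number
--         The first delta value
--     second_deltas : list
--         List of second-order deltas
--
--     Returns:
--     --------
--     data : list
--         The reconstructed sequence
--     """
--     # Start with the first value
--     data = [first_value]
--
--     # Add the second value using first delta
--     data.append(first_value + first_delta)
--
--     # Reconstruct the deltas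
--     deltas = [first_delta]
--     for second_delta in second_deltas:
--         deltas.append(deltas[-1] + second_delta)
--
--     # Reconstruct the sequence
--     for delta in deltas[1:]:  # Skip the first delta which we've already used
--         data.append(data[-1] + delta)
--
--     return data
-- ===== SOURCE B (Python) =====
-- def delta_of_delta_decode(first_value, first_delta, second_deltas):
--     value = first_value
--     delta = first_delta
--     out = [value]
--     value += delta
--     out.append(value)
--     for sd in second_deltas:
--         delta += sd
--         value += delta
--         out.append(value)
--     return out
-- ===== Notes on version B (the rewrite author's own statement) =====
-- stated objective: simpler
-- what changed: B fuses A's two sequential passes (building the full deltas list, then the cumulative-sum pass over it) into a single streaming loop with two running accumulators and no intermediate deltas list.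
import Mathlib
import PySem

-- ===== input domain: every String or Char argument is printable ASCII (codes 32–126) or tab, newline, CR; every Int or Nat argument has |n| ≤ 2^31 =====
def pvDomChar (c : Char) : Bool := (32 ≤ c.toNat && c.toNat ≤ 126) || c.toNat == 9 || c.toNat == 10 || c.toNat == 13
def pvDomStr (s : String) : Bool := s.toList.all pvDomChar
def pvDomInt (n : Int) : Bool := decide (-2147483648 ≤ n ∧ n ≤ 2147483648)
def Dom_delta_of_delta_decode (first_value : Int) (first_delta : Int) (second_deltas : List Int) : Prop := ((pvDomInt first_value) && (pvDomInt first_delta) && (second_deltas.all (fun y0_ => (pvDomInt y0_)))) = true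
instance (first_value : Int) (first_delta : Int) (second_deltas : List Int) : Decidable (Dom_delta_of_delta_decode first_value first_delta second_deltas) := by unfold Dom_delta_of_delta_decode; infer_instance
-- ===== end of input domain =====

-- B replaces A's two sequential passes (materialize the deltas list, then cumulative-sum it)
-- by one streaming loop with two running accumulators; objective: simpler.

-- ===== PORT A =====
-- A: data = [v, v+d]; build deltas list by appending deltas[-1]+sd; then append data[-1]+delta
-- for each delta in deltas[1:].
def delta_of_delta_decode (first_value : Int) (first_delta : Int) (second_deltas : List Int) : List Int :=
  let data : List Int := [first_value, first_value + first_delta]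
  let deltas : List Int :=
    second_deltas.foldl (fun acc second_delta => acc ++ [acc.getLast! + second_delta]) [first_delta]
  (deltas.drop 1).foldl (fun acc delta => acc ++ [acc.getLast! + delta]) data

-- ===== PORT B =====
-- B: single pass keeping (value, delta, out).
def delta_of_delta_decode_alt (first_value : Int) (first_delta : Int) (second_deltas : List Int) : List Int :=
  let s :=
    second_deltas.foldl
      (fun (s : Int × Int × List Int) sd =>
        let delta := s.2.1 + sd
        let value := s.1 + delta
        (value, delta, s.2.2 ++ [value]))
      (first_value + first_delta, first_delta, [first_value, first_value + first_delta])
  s.2.2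

-- ===== PRECONDITION & SPEC =====
def Spec_delta_of_delta_decode (first_value : Int) (first_delta : Int) (second_deltas : List Int) (out : List Int) : Prop := out = delta_of_delta_decode_alt first_value first_delta second_deltas
instance (first_value : Int) (first_delta : Int) (second_deltas : List Int) (out : List Int) : Decidable (Spec_delta_of_delta_decode first_value first_delta second_deltas out) := by unfold Spec_delta_of_delta_decode; infer_instance

-- ===== CLAIM (what is proved, stated in full; the proofs are below) =====
def Claim_equal_delta_of_delta_decode : Prop := ∀ (first_value : Int) (first_delta : Int) (second_deltas : List Int), Dom_delta_of_delta_decode first_value first_delta second_deltas → Spec_delta_of_delta_decode first_value first_delta second_deltas (delta_of_delta_decode first_value first_delta second_deltas)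

-- ===== LEMMAS AND PROOFS =====

-- reference "append one running sum per element" list
def pvRun (l : Int) : List Int → List Int
  | [] => []
  | x :: r => (l + x) :: pvRun (l + x) r

theorem pv_getLast!_concat (acc : List Int) (x : Int) : (acc ++ [x]).getLast! = x := by
  induction acc with
  | nil => rfl
  | cons a as ih =>
    cases as with
    | nil => simp [List.getLast!, List.getLast]
    | cons b bs => simp [List.getLast!, List.getLast]

-- both append-style foldls in A compute acc ++ pvRun l xs when acc ends in l
theorem pv_foldA (xs : List Int) (acc : List Int) (l : Int) (h : acc.getLast! = l) :
    xs.foldl (fun a x => a ++ [a.getLast! + x]) acc = acc ++ pvRun l xs := by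
  induction xs generalizing acc l with
  | nil => simp [pvRun]
  | cons x r ih =>
    simp only [List.foldl, pvRun, h]
    rw [ih (acc ++ [l + x]) (l + x) (pv_getLast!_concat acc (l + x))]
    simp

-- B's fold computes out ++ pvTail, tracked by the two accumulators
def pvTail (value delta : Int) : List Int → List Int
  | [] => []
  | sd :: r => (value + (delta + sd)) :: pvTail (value + (delta + sd)) (delta + sd) r

theorem pv_foldB (xs : List Int) (value delta : Int) (out : List Int) :
    (xs.foldl
      (fun (s : Int × Int × List Int) sd =>
        let d := s.2.1 + sd
        let v := s.1 + d
        (v, d, s.2.2 ++ [v]))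
      (value, delta, out)).2.2 = out ++ pvTail value delta xs := by
  induction xs generalizing value delta out with
  | nil => simp [pvTail]
  | cons sd r ih =>
    simp only [List.foldl, pvTail]
    rw [ih]
    simp

theorem pv_run_eq_tail (xs : List Int) (value delta : Int) :
    pvRun value (pvRun delta xs) = pvTail value delta xs := by
  induction xs generalizing value delta with
  | nil => rfl
  | cons sd r ih => simp [pvRun, pvTail, ih]

-- ===== VERDICT (by name: the statement is the Claim_ definition above) =====
theorem delta_of_delta_decode_spec : Claim_equal_delta_of_delta_decode := by
  intro v d sds _
  unfold Spec_delta_of_delta_decode delta_of_delta_decode delta_of_delta_decode_alt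
  have hA := pv_foldA sds [d] d rfl
  rw [hA]
  simp only [List.singleton_append, List.drop_succ_cons, List.drop_zero]
  rw [pv_foldA (pvRun d sds) [v, v + d] (v + d) (pv_getLast!_concat [v] (v + d)),
      pv_foldB, pv_run_eq_tail]
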